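-- pv_equiv track=rewrite | github.com/loickengit/O_NJU_JK | 分配问题/分配问题.py | solve
-- ===== SOURCE A (Python) =====
-- import itertools
--
-- def solve(matrix):
--     n = len(matrix)
--     ans = float('inf')
--     res = []
--     for combi in itertools.permutations(range(n), n):
--         cur = sum(matrix[i][j] for i, j in zip(range(n), combi))
--         if cur < ans:
--             res = [combi]
--             ans = cur
--         elif cur == ans:
--             res.append(combi)
--     return res
-- ===== SOURCE B (Python) =====
-- def solve(matrix):
--     n = len(matrix)
--
--     def best(i, remaining):
--         # minimal total cost for rows i..n-1 using exactly the columns in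
--         # `remaining`, together with ALL argmin column sequences (as tuples)
--         if not remaining:
--             return (0, [()])
--         best_cost = None
--         acc = []
--         for k in range(len(remaining)):
--             j = remaining[k]
--             sub_cost, subs = best(i + 1, remaining[:k] + remaining[k + 1:])
--             c = matrix[i][j] + sub_cost
--             if best_cost is None or c < best_cost:
--                 best_cost = c
--                 acc = [(j,) + s for s in subs]
--             elif c == best_cost:
--                 acc.extend((j,) + s for s in subs)
--         return (best_cost, acc)
--
--     return best(0, tuple(range(n)))[1]
-- ===== Notes on version B (the rewrite author's own statement) =====
-- stated objective: alternative
-- what changed: Replaces A's flat enumeration of all n! permutations with a streaming min-tracker by a recursive divide-and-combine: best(i, remaining) returns (minimal cost, all argmin column sequences) for the subproblem and parents merge their children's optimal results, so the permutation list is never materialised or scanned.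
import Mathlib
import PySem

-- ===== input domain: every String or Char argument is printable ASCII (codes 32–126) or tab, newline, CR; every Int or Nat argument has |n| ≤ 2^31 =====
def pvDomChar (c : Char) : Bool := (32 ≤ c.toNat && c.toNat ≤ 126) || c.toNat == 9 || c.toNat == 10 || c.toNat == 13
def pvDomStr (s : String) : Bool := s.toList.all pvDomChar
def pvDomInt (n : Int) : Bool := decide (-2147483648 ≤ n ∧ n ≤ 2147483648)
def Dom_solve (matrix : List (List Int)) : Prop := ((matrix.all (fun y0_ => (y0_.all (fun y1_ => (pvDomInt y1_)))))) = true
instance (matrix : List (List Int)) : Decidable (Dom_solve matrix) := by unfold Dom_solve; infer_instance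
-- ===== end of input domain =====

-- B replaces A's flat scan of all permutations (with streaming min tracking) by a recursive
-- divide-and-combine: best(i, remaining) returns (min cost, all argmin sequences) and parents
-- merge children's optima; same output, different algorithmic decomposition.

-- ===== PORT A =====
-- model of itertools.permutations(range(n), n) (lexicographic order):
-- picksA l = [(l[k], l without l[k]) for k in range(len(l))]
def picksA : List Int → List (Int × List Int)
  | [] => []
  | x :: xs => (x, xs) :: (picksA xs).map (fun p => (p.1, x :: p.2))

def pyPermsF : Nat → List Int → List (List Int)
  | 0, _ => [[]]
  | n+1, xs => (picksA xs).flatMap (fun p => (pyPermsF n p.2).map (fun q => p.1 :: q))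

def pyPerms (xs : List Int) : List (List Int) := pyPermsF xs.length xs

def rangeInts (n : Nat) : List Int := (List.range n).map (fun i => Int.ofNat i)

-- cur = sum(matrix[i][j] for i, j in zip(range(n), combi)) (defaults never hit under Pre_solve)
def costOf (matrix : List (List Int)) (combi : List Int) : Int :=
  ((rangeInts matrix.length).zip combi).foldl
    (fun s p => s + PySem.List.pyGetD (PySem.List.pyGetD matrix p.1 []) p.2 0) 0

-- one iteration of A's loop: state = (ans, res), ans = none models float('inf')
def stepA (matrix : List (List Int)) (s : Option Int × List (List Int)) (combi : List Int) :
    Option Int × List (List Int) :=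
  let cur := costOf matrix combi
  match s.1 with
  | none => (some cur, [combi])
  | some a =>
    if cur < a then (some cur, [combi])
    else if cur = a then (some a, s.2 ++ [combi])
    else s

def solve (matrix : List (List Int)) : List (List Int) :=
  ((pyPerms (rangeInts matrix.length)).foldl (stepA matrix) (none, [])).2

-- ===== PORT B =====
-- loop body of best(): merge candidate (cost, argmins) into the (best_cost, acc) state
def mergeStep (s : Option Int × List (List Int)) (cr : Int × List (List Int)) :
    Option Int × List (List Int) :=
  match s.1 with
  | none => (some cr.1, cr.2)
  | some b =>
    if cr.1 < b then (some cr.1, cr.2)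
    else if cr.1 = b then (some b, s.2 ++ cr.2)
    else s

-- best(i, remaining); the loop "for k: j = remaining[k]; rest = remaining without index k"
-- enumerates exactly picksA remaining; fuel = |remaining| (totality only, branches unreachable
-- on the call pattern bestF |rem| i rem)
def bestF (matrix : List (List Int)) : Nat → Int → List Int → Int × List (List Int)
  | _, _, [] => (0, [[]])
  | 0, _, _ :: _ => (0, [])
  | fuel+1, i, x :: xs =>
      let final := (picksA (x :: xs)).foldl
        (fun s p =>
          let r := bestF matrix fuel (i+1) p.2
          mergeStep s (PySem.List.pyGetD (PySem.List.pyGetD matrix i []) p.1 0 + r.1,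
                       r.2.map (fun q => p.1 :: q)))
        ((none : Option Int), ([] : List (List Int)))
      (final.1.getD 0, final.2)

def solve_alt (matrix : List (List Int)) : List (List Int) :=
  let n := matrix.length
  (bestF matrix (rangeInts n).length 0 (rangeInts n)).2

-- ===== PRECONDITION & SPEC =====
-- Pre_solve excludes ragged matrices with a row shorter than len(matrix), on which A raises IndexError.
def Pre_solve (matrix : List (List Int)) : Prop :=
  ∀ row ∈ matrix, matrix.length ≤ row.length
instance (matrix : List (List Int)) : Decidable (Pre_solve matrix) := by
  unfold Pre_solve; infer_instance

def pvWitness_solve : List (List Int) := [[1, 2], [3, 4]]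

def Spec_solve (matrix : List (List Int)) (out : List (List Int)) : Prop := out = solve_alt matrix
instance (matrix : List (List Int)) (out : List (List Int)) : Decidable (Spec_solve matrix out) := by unfold Spec_solve; infer_instance

-- ===== CLAIM (what is proved, stated in full; the proofs are below) =====
def Claim_equal_solve : Prop := ∀ (matrix : List (List Int)), Dom_solve matrix → Pre_solve matrix → Spec_solve matrix (solve matrix)

-- ===== LEMMAS AND PROOFS =====

-- min of the f-costs of a nonempty list (0 if empty; never used empty)
def fMin {α : Type} (f : α → Int) : List α → Int
  | [] => 0
  | x :: xs => xs.foldl (fun m y => min m (f y)) (f x)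

-- cost of a sequence placed from row i on
def costFrom (matrix : List (List Int)) : Int → List Int → Int
  | _, [] => 0
  | i, j :: rest =>
      PySem.List.pyGetD (PySem.List.pyGetD matrix i []) j 0 + costFrom matrix (i+1) rest

theorem foldl_min_le {α : Type} (f : α → Int) :
    ∀ (l : List α) (a : Int), l.foldl (fun m x => min m (f x)) a ≤ a := by
  intro l
  induction l with
  | nil => intro a; simp
  | cons x t ih =>
    intro a
    calc t.foldl (fun m x => min m (f x)) (min a (f x)) ≤ min a (f x) := ih _
      _ ≤ a := min_le_left _ _

theorem foldl_min_le_mem {α : Type} (f : α → Int) :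
    ∀ (l : List α) (a : Int) (x : α), x ∈ l → l.foldl (fun m y => min m (f y)) a ≤ f x := by
  intro l
  induction l with
  | nil => intro a x hx; simp at hx
  | cons h t ih =>
    intro a x hx
    rcases List.mem_cons.mp hx with rfl | hx
    · calc t.foldl (fun m y => min m (f y)) (min a (f x)) ≤ min a (f x) := foldl_min_le f t _
        _ ≤ f x := min_le_right _ _
    · exact ih _ x hx

theorem fMin_le_mem {α : Type} (f : α → Int) : ∀ (l : List α) (x : α), x ∈ l → fMin f l ≤ f x := by
  intro l x hx
  cases l with
  | nil => simp at hx
  | cons h t =>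
    rcases List.mem_cons.mp hx with rfl | hx
    · exact foldl_min_le f t _
    · exact foldl_min_le_mem f t _ x hx

-- every permutation produced has full length
theorem pyPermsF_length : ∀ (n : Nat) (xs : List Int) (p : List Int),
    p ∈ pyPermsF n xs → p.length = n := by
  intro n
  induction n with
  | zero => intro xs p hp; simp [pyPermsF] at hp; simp [hp]
  | succ k ih =>
    intro xs p hp
    simp only [pyPermsF, List.mem_flatMap, List.mem_map] at hp
    obtain ⟨pk, _, q, hq, rfl⟩ := hp
    simp [ih pk.2 q hq]

theorem pyPermsF_ne_nil : ∀ (n : Nat) (xs : List Int), xs.length = n → pyPermsF n xs ≠ [] := by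
  intro n
  induction n with
  | zero => intro xs _; simp [pyPermsF]
  | succ k ih =>
    intro xs hlen
    cases xs with
    | nil => simp at hlen
    | cons y ys =>
      have hys : ys.length = k := by simpa using hlen
      have h1 : pyPermsF k ys ≠ [] := ih ys hys
      simp only [pyPermsF, picksA, List.flatMap_cons, ne_eq, List.append_eq_nil_iff,
        List.map_eq_nil_iff, not_and]
      intro h2
      exact absurd h2 h1

theorem picksA_length : ∀ (xs : List Int) (p : Int × List Int),
    p ∈ picksA xs → p.2.length + 1 = xs.length := by
  intro xs
  induction xs with
  | nil => intro p hp; simp [picksA] at hp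
  | cons x t ih =>
    intro p hp
    simp only [picksA, List.mem_cons, List.mem_map] at hp
    rcases hp with rfl | ⟨q, hq, rfl⟩
    · simp
    · have := ih q hq
      simp only [List.length_cons]
      omega

-- characterisation of the merge fold from a proper state
theorem mergeStep_fold :
    ∀ (items : List (Int × List (List Int))) (b : Int) (acc : List (List Int)),
      items.foldl mergeStep (some b, acc)
        = (some (items.foldl (fun m cr => min m cr.1) b),
           (if items.foldl (fun m cr => min m cr.1) b = b then acc else [])
             ++ (items.filter
                  (fun cr => cr.1 = items.foldl (fun m cr => min m cr.1) b)).flatMap Prod.snd) := by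
  intro items
  induction items with
  | nil => intro b acc; simp
  | cons x t ih =>
    intro b acc
    simp only [List.foldl_cons, List.filter_cons]
    have hM : t.foldl (fun m cr => min m cr.1) (min b x.1) ≤ min b x.1 :=
      foldl_min_le Prod.fst t _
    rcases lt_trichotomy x.1 b with h | h | h
    · have hs : mergeStep (some b, acc) x = (some x.1, x.2) := by
        simp [mergeStep, h]
      have hA : min b x.1 = x.1 := by omega
      rw [hs, ih x.1 x.2]
      rw [hA] at hM
      simp only [hA]
      have hne : t.foldl (fun m cr => min m cr.1) x.1 ≠ b := by omega
      rw [if_neg hne]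
      by_cases he : t.foldl (fun m cr => min m cr.1) x.1 = x.1
      · simp [he]
      · have he2 : ¬ (x.1 = t.foldl (fun m cr => min m cr.1) x.1) :=
          fun hh => he hh.symm
        simp [he, he2]
    · have hs : mergeStep (some b, acc) x = (some b, acc ++ x.2) := by
        simp [mergeStep, h]
      have hA : min b x.1 = b := by omega
      rw [hs, ih b (acc ++ x.2)]
      rw [hA] at hM
      simp only [hA]
      by_cases hM2 : t.foldl (fun m cr => min m cr.1) b = b
      · simp [hM2, List.append_assoc, show x.1 = b by omega]
      · have he2 : ¬ (x.1 = t.foldl (fun m cr => min m cr.1) b) := by omega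
        simp [hM2, he2]
    · have h1 : ¬ (x.1 < b) := by omega
      have h2 : ¬ (x.1 = b) := by omega
      have hs : mergeStep (some b, acc) x = (some b, acc) := by
        simp [mergeStep, h1, h2]
      have hA : min b x.1 = b := by omega
      rw [hs, ih b acc]
      rw [hA] at hM
      simp only [hA]
      have he2 : ¬ (x.1 = t.foldl (fun m cr => min m cr.1) b) := by omega
      simp [he2]

theorem foldl_min_seed {α : Type} (f : α → Int) :
    ∀ (l : List α) (a c : Int),
      l.foldl (fun m x => min m (f x)) (min a c) = min a (l.foldl (fun m x => min m (f x)) c) := by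
  intro l
  induction l with
  | nil => intro a c; simp
  | cons y t ih =>
    intro a c
    simp only [List.foldl_cons]
    rw [min_assoc, ih]

theorem foldl_min_group {α : Type} (f : α → Int) (g : List α) (hg : g ≠ []) (a : Int) :
    g.foldl (fun m x => min m (f x)) a = min a (fMin f g) := by
  cases g with
  | nil => exact absurd rfl hg
  | cons x t => simp only [List.foldl_cons, fMin]; rw [foldl_min_seed]

theorem fMin_flatten (f : List Int → Int) :
    ∀ (gt : List (List (List Int))) (a : Int), (∀ g ∈ gt, g ≠ []) →
      gt.foldl (fun m g => min m (fMin f g)) a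
        = gt.flatten.foldl (fun m x => min m (f x)) a := by
  intro gt
  induction gt with
  | nil => intro a _; simp
  | cons g rest ih =>
    intro a hne
    simp only [List.foldl_cons, List.flatten_cons, List.foldl_append]
    rw [foldl_min_group f g (hne g (by simp)) a, ih _ (fun g' hg' => hne g' (by simp [hg']))]

theorem filter_groups (f : List Int → Int) (M : Int) :
    ∀ (gt : List (List (List Int))), (∀ g ∈ gt, M ≤ fMin f g) →
      ((gt.map (fun g => (fMin f g, g.filter (fun x => f x = fMin f g)))).filter
          (fun cr => cr.1 = M)).flatMap Prod.snd
        = gt.flatten.filter (fun x => f x = M) := by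
  intro gt
  induction gt with
  | nil => intro _; simp
  | cons g rest ih =>
    intro hle
    have hrest := ih (fun g' hg' => hle g' (by simp [hg']))
    simp only [List.map_cons, List.filter_cons, List.flatten_cons, List.filter_append]
    by_cases h : fMin f g = M
    · simp [h, hrest]
    · have hlt : M < fMin f g := lt_of_le_of_ne (hle g (by simp)) (fun hh => h hh.symm)
      have hnil : g.filter (fun x => decide (f x = M)) = [] := by
        rw [List.filter_eq_nil_iff]
        intro x hx
        have := fMin_le_mem f g x hx
        simp only [decide_eq_true_eq]
        omega
      simp only [h, decide_false, Bool.false_eq_true, if_false, hrest, hnil, List.nil_append]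

-- merge fold over per-group optima = global optimum over the concatenation
theorem merge_groups (f : List Int → Int) :
    ∀ (gs : List (List (List Int))), gs ≠ [] → (∀ g ∈ gs, g ≠ []) →
      (gs.map (fun g => (fMin f g, g.filter (fun x => f x = fMin f g)))).foldl
          mergeStep (none, [])
        = (some (fMin f gs.flatten),
           gs.flatten.filter (fun x => f x = fMin f gs.flatten)) := by
  intro gs hgs hne
  cases gs with
  | nil => exact absurd rfl hgs
  | cons g0 gt =>
    have hg0 : g0 ≠ [] := hne g0 (by simp)
    have hgt : ∀ g ∈ gt, g ≠ [] := fun g' hg' => hne g' (by simp [hg'])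
    simp only [List.map_cons, List.foldl_cons]
    have h0 : mergeStep (none, []) (fMin f g0, g0.filter (fun x => f x = fMin f g0))
        = (some (fMin f g0), g0.filter (fun x => f x = fMin f g0)) := by
      simp [mergeStep]
    rw [h0, mergeStep_fold]
    rw [List.foldl_map]
    have hMdef : (gt.map (fun g => (fMin f g, g.filter (fun x => f x = fMin f g)))).foldl
        (fun m cr => min m cr.1) (fMin f g0)
        = gt.foldl (fun m g => min m (fMin f g)) (fMin f g0) := by
      rw [List.foldl_map]
    rw [hMdef] at *
    set M := gt.foldl (fun m g => min m (fMin f g)) (fMin f g0) with hM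
    have hMflat : fMin f (g0 :: gt).flatten = M := by
      cases g0 with
      | nil => exact absurd rfl hg0
      | cons x t =>
        simp only [List.flatten_cons, List.cons_append, fMin, List.foldl_append]
        rw [← fMin_flatten f gt _ hgt]
        rfl
    have hMle0 : M ≤ fMin f g0 := foldl_min_le (fMin f) gt _
    have hMle : ∀ g ∈ gt, M ≤ fMin f g := by
      intro g hg
      exact foldl_min_le_mem (fMin f) gt _ g hg
    rw [filter_groups f M gt hMle, hMflat]
    simp only [List.flatten_cons, List.filter_append]
    by_cases h : M = fMin f g0
    · rw [if_pos h]
      rw [show g0.filter (fun x => decide (f x = fMin f g0)) = g0.filter (fun x => decide (f x = M)) by rw [h]]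
    · rw [if_neg h]
      have hnil : g0.filter (fun x => decide (f x = M)) = [] := by
        rw [List.filter_eq_nil_iff]
        intro x hx
        have h1 := fMin_le_mem f g0 x hx
        have h2 : M < fMin f g0 := lt_of_le_of_ne hMle0 h
        simp only [decide_eq_true_eq]
        omega
      simp [hnil]

theorem foldl_min_add (g : List Int → Int) (c : Int) :
    ∀ (l : List (List Int)) (a : Int),
      l.foldl (fun m q => min m (c + g q)) (c + a) = c + l.foldl (fun m q => min m (g q)) a := by
  intro l
  induction l with
  | nil => intro a; simp
  | cons y t ih =>
    intro a
    simp only [List.foldl_cons]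
    rw [min_add_add_left, ih]

theorem fMin_add (g : List Int → Int) (c : Int) (l : List (List Int)) (h : l ≠ []) :
    fMin (fun q => c + g q) l = c + fMin g l := by
  cases l with
  | nil => exact absurd rfl h
  | cons y t => simp only [fMin]; exact foldl_min_add g c t (g y)

theorem fMin_map {α β : Type} (h : β → Int) (m : α → β) (l : List α) :
    fMin h (l.map m) = fMin (fun y => h (m y)) l := by
  cases l with
  | nil => rfl
  | cons y t => simp only [fMin, List.map_cons, List.foldl_map]

theorem filter_map_cons (j : Int) (p : List Int → Bool) :
    ∀ (l : List (List Int)),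
      (l.map (fun q => j :: q)).filter p = (l.filter (fun q => p (j :: q))).map (fun q => j :: q) := by
  intro l
  induction l with
  | nil => rfl
  | cons y t ih =>
    simp only [List.map_cons, List.filter_cons]
    by_cases h : p (j :: y)
    · simp [h, ih]
    · simp [h, ih]

-- main characterisation of B's recursion
theorem bestF_spec (matrix : List (List Int)) :
    ∀ (fuel : Nat) (rem : List Int) (i : Int), rem.length = fuel →
      bestF matrix fuel i rem
        = (fMin (costFrom matrix i) (pyPermsF fuel rem),
           (pyPermsF fuel rem).filter
             (fun p => costFrom matrix i p = fMin (costFrom matrix i) (pyPermsF fuel rem))) := by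
  intro fuel
  induction fuel with
  | zero =>
    intro rem i h
    cases rem with
    | nil => simp [bestF, pyPermsF, fMin, costFrom]
    | cons _ _ => simp at h
  | succ k ih =>
    intro rem i hlen
    cases rem with
    | nil => simp at hlen
    | cons x xs =>
      have hxs : xs.length = k := by simpa using hlen
      have hmap : (picksA (x :: xs)).map
            (fun p => (PySem.List.pyGetD (PySem.List.pyGetD matrix i []) p.1 0
                          + (bestF matrix k (i+1) p.2).1,
                       (bestF matrix k (i+1) p.2).2.map (fun q => p.1 :: q)))
          = ((picksA (x :: xs)).map (fun p => (pyPermsF k p.2).map (fun q => p.1 :: q))).map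
              (fun g => (fMin (costFrom matrix i) g,
                         g.filter (fun y => costFrom matrix i y = fMin (costFrom matrix i) g))) := by
        rw [List.map_map]
        apply List.map_congr_left
        intro p hp
        have hplen : p.2.length = k := by
          have := picksA_length (x :: xs) p hp
          simp only [List.length_cons] at this
          omega
        have hne : pyPermsF k p.2 ≠ [] := pyPermsF_ne_nil k p.2 hplen
        rw [ih p.2 (i+1) hplen]
        simp only [Function.comp]
        have h1 : fMin (costFrom matrix i) ((pyPermsF k p.2).map (fun q => p.1 :: q))
            = PySem.List.pyGetD (PySem.List.pyGetD matrix i []) p.1 0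
                + fMin (costFrom matrix (i+1)) (pyPermsF k p.2) := by
          rw [fMin_map]
          simp only [costFrom]
          exact fMin_add (costFrom matrix (i+1)) _ _ hne
        rw [h1]
        have h2 : ((pyPermsF k p.2).map (fun q => p.1 :: q)).filter
              (fun y => decide (costFrom matrix i y
                = PySem.List.pyGetD (PySem.List.pyGetD matrix i []) p.1 0
                    + fMin (costFrom matrix (i+1)) (pyPermsF k p.2)))
            = ((pyPermsF k p.2).filter
                (fun q => decide (costFrom matrix (i+1) q
                  = fMin (costFrom matrix (i+1)) (pyPermsF k p.2)))).map (fun q => p.1 :: q) := by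
          rw [filter_map_cons]
          apply congrArg
          apply List.filter_congr
          intro q _
          simp only [costFrom, decide_eq_decide]
          omega
        rw [h2]
      have hflat : ((picksA (x :: xs)).map (fun p => (pyPermsF k p.2).map (fun q => p.1 :: q))).flatten
          = pyPermsF (k+1) (x :: xs) := by
        simp [pyPermsF, List.flatMap_def]
      have hgne : ∀ g ∈ (picksA (x :: xs)).map (fun p => (pyPermsF k p.2).map (fun q => p.1 :: q)),
          g ≠ [] := by
        intro g hg
        simp only [List.mem_map] at hg
        obtain ⟨p, hp, rfl⟩ := hg
        have hplen : p.2.length = k := by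
          have := picksA_length (x :: xs) p hp
          simp only [List.length_cons] at this
          omega
        simp [pyPermsF_ne_nil k p.2 hplen]
      have hgsne : (picksA (x :: xs)).map (fun p => (pyPermsF k p.2).map (fun q => p.1 :: q)) ≠ [] := by
        simp [picksA]
      simp only [bestF]
      rw [← List.foldl_map, hmap, merge_groups (costFrom matrix i) _ hgsne hgne, hflat]
      simp

theorem costOf_aux (matrix : List (List Int)) :
    ∀ (c : List Int) (i : Nat) (a : Int),
      (((List.range' i c.length).map (fun k => Int.ofNat k)).zip c).foldl
          (fun s p => s + PySem.List.pyGetD (PySem.List.pyGetD matrix p.1 []) p.2 0) a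
        = a + costFrom matrix (i : Int) c := by
  intro c
  induction c with
  | nil => intro i a; simp [costFrom]
  | cons j rest ih =>
    intro i a
    simp only [List.length_cons, List.range'_succ, List.map_cons, List.zip_cons_cons,
      List.foldl_cons]
    rw [ih (i+1)]
    simp only [costFrom, Int.ofNat_eq_natCast]
    push_cast
    ring

theorem costOf_eq_costFrom (matrix : List (List Int)) (c : List Int)
    (h : c.length = matrix.length) : costOf matrix c = costFrom matrix 0 c := by
  unfold costOf rangeInts
  have : (List.range matrix.length).map (fun i => Int.ofNat i)
      = (List.range' 0 c.length).map (fun k => Int.ofNat k) := by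
    rw [List.range_eq_range', h]
  rw [this, costOf_aux matrix c 0 0]
  simp

theorem foldl_min_congr {α : Type} (f g : α → Int) :
    ∀ (l : List α) (a : Int), (∀ x ∈ l, f x = g x) →
      l.foldl (fun m x => min m (f x)) a = l.foldl (fun m x => min m (g x)) a := by
  intro l
  induction l with
  | nil => intro a _; rfl
  | cons y t ih =>
    intro a h
    simp only [List.foldl_cons]
    rw [h y (by simp), ih _ (fun x hx => h x (by simp [hx]))]

theorem fMin_congr {α : Type} (f g : α → Int) (l : List α) (h : ∀ x ∈ l, f x = g x) :
    fMin f l = fMin g l := by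
  cases l with
  | nil => rfl
  | cons y t =>
    simp only [fMin]
    rw [h y (by simp), foldl_min_congr f g t _ (fun x hx => h x (by simp [hx]))]

theorem pyPerms_ne_nil (xs : List Int) : pyPerms xs ≠ [] :=
  pyPermsF_ne_nil xs.length xs rfl

-- ===== VERDICT (by name: the statement is the Claim_ definition above) =====
theorem solve_spec : Claim_equal_solve := by
  intro matrix _ _
  unfold Spec_solve
  have hstep : stepA matrix = fun s combi => mergeStep s (costOf matrix combi, [combi]) := by
    funext s combi
    simp only [stepA, mergeStep]
  set R := rangeInts matrix.length with hR
  have hA : (pyPerms R).foldl (stepA matrix) (none, [])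
      = (((pyPerms R).map (fun p => [p])).map
          (fun g => (fMin (costOf matrix) g,
                     g.filter (fun x => costOf matrix x = fMin (costOf matrix) g)))).foldl
          mergeStep (none, []) := by
    rw [List.map_map]
    rw [hstep, ← List.foldl_map]
    apply congrArg
    apply List.map_congr_left
    intro p _
    simp [fMin]
  have hflat : ((pyPerms R).map (fun p => [p])).flatten = pyPerms R := by
    induction pyPerms R with
    | nil => rfl
    | cons y t ih => simp only [List.map_cons, List.flatten_cons, List.singleton_append, ih]
  have hB : bestF matrix R.length 0 R
      = (fMin (costFrom matrix 0) (pyPerms R),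
         (pyPerms R).filter
           (fun p => costFrom matrix 0 p = fMin (costFrom matrix 0) (pyPerms R))) :=
    bestF_spec matrix R.length R 0 rfl
  show ((pyPerms R).foldl (stepA matrix) ((none : Option Int), ([] : List (List Int)))).2
      = (bestF matrix R.length 0 R).2
  rw [hA, merge_groups (costOf matrix) _ (by simp [pyPerms_ne_nil R]) (by intro g hg; simp only [List.mem_map] at hg; obtain ⟨p, _, rfl⟩ := hg; simp), hflat, hB]
  have hlenR : R.length = matrix.length := by simp [hR, rangeInts]
  have hcost : ∀ p ∈ pyPerms R, costOf matrix p = costFrom matrix 0 p := by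
    intro p hp
    exact costOf_eq_costFrom matrix p
      ((pyPermsF_length R.length R p hp).trans hlenR)
  have hmin : fMin (costOf matrix) (pyPerms R) = fMin (costFrom matrix 0) (pyPerms R) :=
    fMin_congr _ _ _ hcost
  simp only [hmin]
  apply List.filter_congr
  intro p hp
  simp [hcost p hp]
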